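-- pv_equiv track=rewrite | github.com/OceanBear/image_analysis_scripts | neighborhood_composition/spatial_contexts/spatial_contexts_unified.py | _should_connect_hierarchically
-- ===== SOURCE A (Python) =====
-- def _should_connect_hierarchically(sc1: str, sc2: str) -> bool:
--     """
--     Determine if two SCs should be connected based on hierarchical rules.
--
--     Rules:
--     1. Only connect nodes in adjacent rows (differ by exactly 1 CN)
--     2. The node with more CNs must contain ALL numbers from the node with fewer CNs
--     3. Example: '2_4_6' can connect to '2_3_4_6' or '2_4_5_6' but not '1_2_5_6'
--
--     Parameters:
--     -----------
--     sc1 : str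
--         First SC label (e.g., '2_4_6')
--     sc2 : str
--         Second SC label (e.g., '2_3_4_6')
--
--     Returns:
--     --------
--     bool
--         True if the SCs should be connected
--     """
--     try:
--         # Parse SC labels into sets of numbers
--         nums1 = set(int(x) for x in sc1.split('_'))
--         nums2 = set(int(x) for x in sc2.split('_'))
--
--         # Check if they differ by exactly 1 CN (adjacent rows)
--         if abs(len(nums1) - len(nums2)) != 1:
--             return False
--
--         # The larger set must contain all numbers from the smaller set
--         if len(nums1) < len(nums2):
--             # sc1 is smaller, sc2 must contain all of sc1's numbers
--             return nums1.issubset(nums2)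
--         else:
--             # sc2 is smaller, sc1 must contain all of sc2's numbers
--             return nums2.issubset(nums1)
--
--     except (ValueError, AttributeError):
--         # If parsing fails, don't connect
--         return False
-- ===== SOURCE B (Python) =====
-- def _should_connect_hierarchically(sc1: str, sc2: str) -> bool:
--     try:
--         nums1 = set(int(x) for x in sc1.split('_'))
--         nums2 = set(int(x) for x in sc2.split('_'))
--     except (ValueError, AttributeError):
--         return False
--     # connected iff the symmetric difference holds exactly one number
--     return len(nums1 ^ nums2) == 1
-- ===== Notes on version B (the rewrite author's own statement) =====
-- stated objective: simpler
-- what changed: Replaces the size-difference test plus the branch on which set is larger (two issubset cases) by a single set-theoretic test: the symmetric difference of the two parsed sets has exactly one element.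
import Mathlib
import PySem

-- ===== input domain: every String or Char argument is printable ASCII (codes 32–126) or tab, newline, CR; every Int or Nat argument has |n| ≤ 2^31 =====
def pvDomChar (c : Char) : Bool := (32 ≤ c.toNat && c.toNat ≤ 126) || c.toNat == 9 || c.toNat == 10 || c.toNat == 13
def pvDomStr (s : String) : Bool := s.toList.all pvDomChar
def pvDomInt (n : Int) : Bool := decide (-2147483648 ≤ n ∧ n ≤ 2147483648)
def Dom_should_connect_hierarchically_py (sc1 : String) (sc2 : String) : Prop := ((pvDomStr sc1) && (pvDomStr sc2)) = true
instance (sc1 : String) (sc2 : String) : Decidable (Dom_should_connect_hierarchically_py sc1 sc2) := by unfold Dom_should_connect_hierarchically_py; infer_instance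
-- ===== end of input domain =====

-- B replaces A's size-difference check plus larger/smaller subset branching by one test:
-- the symmetric difference of the two parsed sets has exactly one element. Objective: simpler.

-- shared helper: 'set(int(x) for x in s.split('_'))', none = ValueError (the try/except of both Pythons)
def pvParseNums (s : String) : Option (PySem.Set Int) :=
  (PySem.Str.split? s "_").bind fun parts =>
    (parts.mapM PySem.Int.ofStr?).map PySem.Set.ofList

-- ===== PORT A =====
def should_connect_hierarchically_py (sc1 : String) (sc2 : String) : Bool :=
  match pvParseNums sc1, pvParseNums sc2 with
  | some nums1, some nums2 =>
    if ((nums1.length : Int) - (nums2.length : Int)).natAbs ≠ 1 then false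
    else if nums1.length < nums2.length then PySem.Set.issubset nums1 nums2
    else PySem.Set.issubset nums2 nums1
  | _, _ => false

-- ===== PORT B =====
def should_connect_hierarchically_py_alt (sc1 : String) (sc2 : String) : Bool :=
  (Option.bind (pvParseNums sc1) fun nums1 =>
   Option.bind (pvParseNums sc2) fun nums2 =>
   some (PySem.Set.len (PySem.Set.symmDiff nums1 nums2) == 1)).getD false

-- ===== PRECONDITION & SPEC =====
def Spec_should_connect_hierarchically_py (sc1 : String) (sc2 : String) (out : Bool) : Prop := out = should_connect_hierarchically_py_alt sc1 sc2
instance (sc1 : String) (sc2 : String) (out : Bool) : Decidable (Spec_should_connect_hierarchically_py sc1 sc2 out) := by unfold Spec_should_connect_hierarchically_py; infer_instance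

-- ===== CLAIM (what is proved, stated in full; the proofs are below) =====
def Claim_equal_should_connect_hierarchically_py : Prop := ∀ (sc1 : String) (sc2 : String), Dom_should_connect_hierarchically_py sc1 sc2 → Spec_should_connect_hierarchically_py sc1 sc2 (should_connect_hierarchically_py sc1 sc2)

-- ===== LEMMAS AND PROOFS =====

lemma pv_toFinset_diff (s t : PySem.Set Int) :
    (PySem.Set.diff s t).toFinset = s.toFinset \ t.toFinset := by
  ext x
  simp [PySem.Set.mem_diff]

lemma pv_len_diff (s t : PySem.Set Int) (hs : s.Nodup) :
    (PySem.Set.diff s t).length = (s.toFinset \ t.toFinset).card := by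
  rw [← pv_toFinset_diff s t, List.toFinset_card_of_nodup (PySem.Set.nodup_diff s t hs)]

lemma pv_subset_card (s t : PySem.Set Int) :
    (PySem.Set.issubset s t = true) ↔ (s.toFinset \ t.toFinset).card = 0 := by
  rw [PySem.Set.issubset_iff, Finset.card_eq_zero, Finset.sdiff_eq_empty_iff_subset]
  constructor
  · intro h x hx
    rcases List.mem_toFinset.mp hx with hx'
    exact List.mem_toFinset.mpr (h x hx')
  · intro h x hx
    exact List.mem_toFinset.mp (h (List.mem_toFinset.mpr hx))

lemma pv_core (s t : PySem.Set Int) (hs : s.Nodup) (ht : t.Nodup) :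
    (if ((s.length : Int) - (t.length : Int)).natAbs ≠ 1 then false
     else if s.length < t.length then PySem.Set.issubset s t
     else PySem.Set.issubset t s)
    = (PySem.Set.len (PySem.Set.symmDiff s t) == 1) := by
  have hlen_s : s.length = s.toFinset.card := (List.toFinset_card_of_nodup hs).symm
  have hlen_t : t.length = t.toFinset.card := (List.toFinset_card_of_nodup ht).symm
  have hd1 := pv_len_diff s t hs
  have hd2 := pv_len_diff t s ht
  have hsd : PySem.Set.len (PySem.Set.symmDiff s t)
      = (((s.toFinset \ t.toFinset).card : Int) + ((t.toFinset \ s.toFinset).card : Int)) := by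
    have : PySem.Set.symmDiff s t = PySem.Set.diff s t ++ PySem.Set.diff t s := rfl
    simp [PySem.Set.len, this, List.length_append, hd1, hd2]
  have hx := Finset.card_inter_add_card_sdiff s.toFinset t.toFinset
  have hy := Finset.card_inter_add_card_sdiff t.toFinset s.toFinset
  have hcomm : (t.toFinset ∩ s.toFinset).card = (s.toFinset ∩ t.toFinset).card := by
    rw [Finset.inter_comm]
  have hsub1 := pv_subset_card s t
  have hsub2 := pv_subset_card t s
  rw [Bool.eq_iff_iff, beq_iff_eq, hsd]
  split_ifs with h1 h2
  · simp only [false_iff]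
    intro hcontra
    apply h1
    omega
  · rw [hsub1]; omega
  · rw [hsub2]; omega

-- ===== VERDICT (by name: the statement is the Claim_ definition above) =====
theorem should_connect_hierarchically_py_spec : Claim_equal_should_connect_hierarchically_py := by
  intro sc1 sc2 _
  unfold Spec_should_connect_hierarchically_py should_connect_hierarchically_py should_connect_hierarchically_py_alt
  cases h1 : pvParseNums sc1 with
  | none => rfl
  | some n1 =>
    cases h2 : pvParseNums sc2 with
    | none => rfl
    | some n2 =>
      have hn1 : n1.Nodup := by
        unfold pvParseNums at h1
        rcases Option.map_eq_some_iff.mp h1 with ⟨l, _, rfl⟩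
        exact PySem.Set.nodup_ofList l
      have hn2 : n2.Nodup := by
        unfold pvParseNums at h2
        rcases Option.map_eq_some_iff.mp h2 with ⟨l, _, rfl⟩
        exact PySem.Set.nodup_ofList l
      exact pv_core n1 n2 hn1 hn2
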